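-- pv_equiv track=rewrite | github.com/nullisnullornotanobject/psychic-fiesta | rabota1.py | func
-- ===== SOURCE A (Python) =====
-- def func(c):
--     answ = 1
--     check = False
--     for i in c:
--         if i.isdigit():
--             check = True
--         if not i.isdigit():
--             if check:
--                 answ += 1
--             check = False
--     return answ
-- ===== SOURCE B (Python) =====
-- def func(c):
--     # Run-length-encode the string into its alternating isdigit run keys,
--     # then count the digit runs that are not the final run, plus one.
--     groups = []
--     for ch in c:
--         k = ch.isdigit()
--         if not groups or groups[-1] != k:
--             groups.append(k)
--     return 1 + sum(groups[:-1])
-- ===== Notes on version B (the rewrite author's own statement) =====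
-- stated objective: idiomatic
-- what changed: Replaces A's carried answ/check flag that counts digit-to-non-digit transitions by a staged run-length encoding: first collapse the string into its list of alternating isdigit run keys, then return 1 plus the sum of all run keys except the last (a digit run is followed by a non-digit exactly when it is not the final run).
import Mathlib
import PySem

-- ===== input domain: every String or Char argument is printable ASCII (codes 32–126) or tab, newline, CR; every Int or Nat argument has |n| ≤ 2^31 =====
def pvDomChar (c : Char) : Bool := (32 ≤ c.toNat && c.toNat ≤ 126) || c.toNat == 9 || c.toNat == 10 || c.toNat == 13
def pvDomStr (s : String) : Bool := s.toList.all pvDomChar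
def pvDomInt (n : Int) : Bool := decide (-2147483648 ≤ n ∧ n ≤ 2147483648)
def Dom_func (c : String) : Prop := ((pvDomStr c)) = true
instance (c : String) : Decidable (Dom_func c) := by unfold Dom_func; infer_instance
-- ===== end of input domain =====

-- B replaces A's carried answ/check flag by a staged run-length encoding: build the
-- list of alternating isdigit run keys, then return 1 + sum of all keys but the last.

-- ===== PORT A =====
-- literal port of A: the loop body (two successive if-statements on i.isdigit(), in order)
def pvStepA (st : Int × Bool) (i : Char) : Int × Bool :=
  let st1 := if PySem.Chars.isdigit i then (st.1, true) else st
  if ¬ PySem.Chars.isdigit i then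
    (if st1.2 then st1.1 + 1 else st1.1, false)
  else st1

def func (c : String) : Int :=
  (c.toList.foldl pvStepA (1, false)).1

-- ===== PORT B =====
-- groups: run-length-encoded isdigit keys; append k when groups is empty or its last ≠ k
def pvStepB (g : List Bool) (ch : Char) : List Bool :=
  let k := PySem.Chars.isdigit ch
  if g = [] ∨ g.getLast? ≠ some k then g ++ [k] else g

def func_alt (c : String) : Int :=
  1 + (((c.toList.foldl pvStepB []).dropLast.countP id : Nat) : Int)

-- ===== PRECONDITION & SPEC =====
def Spec_func (c : String) (out : Int) : Prop := out = func_alt c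
instance (c : String) (out : Int) : Decidable (Spec_func c out) := by unfold Spec_func; infer_instance

-- ===== CLAIM (what is proved, stated in full; the proofs are below) =====
def Claim_equal_func : Prop := ∀ (c : String), Dom_func c → Spec_func c (func c)

-- ===== LEMMAS AND PROOFS =====

-- number of True→False adjacent transitions in prev :: l (characterises A's count)
def pvTrans (prev : Bool) : List Bool → Nat
  | [] => 0
  | k :: ks => (if prev && !k then 1 else 0) + pvTrans k ks

-- recursive form of B's run-length grouping, given the key of the current run
def pvDedup (prev : Bool) : List Char → List Bool
  | [] => []
  | ch :: cs =>
      if PySem.Chars.isdigit ch = prev then pvDedup prev cs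
      else PySem.Chars.isdigit ch :: pvDedup (PySem.Chars.isdigit ch) cs

theorem pvStepA_eq (a : Int) (ch : Bool) (i : Char) :
    pvStepA (a, ch) i =
      if PySem.Chars.isdigit i then (a, true) else (if ch then a + 1 else a, false) := by
  unfold pvStepA
  by_cases h : PySem.Chars.isdigit i = true <;> simp [h]

theorem pvA_fold (l : List Char) : ∀ (a : Int) (ch : Bool),
    (l.foldl pvStepA (a, ch)).1 = a + pvTrans ch (l.map PySem.Chars.isdigit) := by
  induction l with
  | nil => intro a ch; simp [pvTrans]
  | cons i l ih =>
      intro a ch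
      rw [List.foldl_cons, pvStepA_eq]
      cases hk : PySem.Chars.isdigit i <;> cases ch <;>
        simp only [hk, if_true, if_false, List.map_cons, pvTrans ,
          Bool.false_eq_true, Bool.and_self, Bool.true_and, Bool.false_and, Bool.not_false,
          Bool.not_true] <;> rw [ih] <;> push_cast <;> ring

-- B's fold equals a prefix g ++ [p] followed by the recursive grouping from key p
theorem pvB_fold (l : List Char) : ∀ (g : List Bool) (p : Bool),
    l.foldl pvStepB (g ++ [p]) = g ++ [p] ++ pvDedup p l := by
  induction l with
  | nil => intro g p; simp [pvDedup]
  | cons ch cs ih =>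
      intro g p
      rw [List.foldl_cons]
      by_cases h : PySem.Chars.isdigit ch = p
      · have hs : pvStepB (g ++ [p]) ch = g ++ [p] := by
          unfold pvStepB; simp [h]
        rw [hs, ih g p]
        simp [pvDedup, h]
      · have hs : pvStepB (g ++ [p]) ch = (g ++ [p]) ++ [PySem.Chars.isdigit ch] := by
          unfold pvStepB
          have hlast : (g ++ [p]).getLast? = some p := by simp
          rw [hlast]
          simp [Ne.symm h]
        rw [hs, ih (g ++ [p]) (PySem.Chars.isdigit ch)]
        simp [pvDedup, h]

-- the key count: digit runs not in last position = True→False transitions from key prev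
theorem pvCount_eq (l : List Char) : ∀ (prev : Bool),
    ((prev :: pvDedup prev l).dropLast.countP id) = pvTrans prev (l.map PySem.Chars.isdigit) := by
  induction l with
  | nil => intro prev; simp [pvDedup, pvTrans]
  | cons ch cs ih =>
      intro prev
      unfold pvDedup
      by_cases h : PySem.Chars.isdigit ch = prev
      · simp only [h, if_true, List.map_cons, pvTrans]
        rw [ih prev]
        simp [h]
      · simp only [h, if_false, List.map_cons, pvTrans]
        have hne : (pvDedup (PySem.Chars.isdigit ch) cs).length + 1 ≠ 0 := by omega
        have hdrop :
            (prev :: PySem.Chars.isdigit ch :: pvDedup (PySem.Chars.isdigit ch) cs).dropLast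
              = prev :: (PySem.Chars.isdigit ch :: pvDedup (PySem.Chars.isdigit ch) cs).dropLast := by
          simp [List.dropLast]
        rw [hdrop, List.countP_cons, ih (PySem.Chars.isdigit ch)]
        cases prev <;> cases hk : PySem.Chars.isdigit ch <;> simp_all <;> omega

-- ===== VERDICT (by name: the statement is the Claim_ definition above) =====
theorem func_spec : Claim_equal_func := by
  intro c _
  unfold Spec_func func func_alt
  rw [pvA_fold]
  cases hl : c.toList with
  | nil => simp [pvTrans]
  | cons ch cs =>
      rw [List.foldl_cons]
      have hstep : pvStepB [] ch = [] ++ [PySem.Chars.isdigit ch] := by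
        unfold pvStepB; simp
      rw [hstep, pvB_fold]
      simp only [List.nil_append, List.map_cons]
      have hc := pvCount_eq cs (PySem.Chars.isdigit ch)
      rw [show ([PySem.Chars.isdigit ch] ++ pvDedup (PySem.Chars.isdigit ch) cs)
            = PySem.Chars.isdigit ch :: pvDedup (PySem.Chars.isdigit ch) cs from rfl, hc]
      simp [pvTrans]
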